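-- pv_equiv track=rewrite | github.com/danaredena/Galois-Field-Calculator-GF-2-m- | galoisfield.py | abs_subtraction
-- ===== SOURCE A (Python) =====
-- def popzero(poly):
--     if (len(poly) > 1):
--         while (poly[0] == 0 or poly[0] == '0'):
--             poly.pop(0)
--             if (len(poly) == 1):
--                 return poly
--     return poly
--
-- def popzero_rev(poly):
--     poly_rev = poly[::-1]
--     poly_rev = popzero(poly_rev)
--     return poly_rev[::-1]
--
-- def addition(aox, box):
--     #aox > box
--     if (len(aox) < len(box)):
--         temp = aox[:]
--         aox = box[:]
--         box = temp[:]
--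
--     plus = []
--     for i in range(len(aox)):
--         if (i < len(box)):
--             a = int(aox[i])
--             b = int(box[i])
--             plus.append(a+b)
--         else:
--             plus.append(int(aox[i]))
--     return(plus)
--
-- def abs_subtraction(aox, box):
--     box_neg = box[:]
--     for i in range(len(box)):
--         box_neg[i] = int(box[i])* -1
--     poly = addition(aox, box_neg)
--     for j in range(len(poly)):
--         poly[j] = abs(int(poly[j]))
--     poly = popzero_rev(poly)
--     return poly
-- ===== SOURCE B (Python) =====
-- def abs_subtraction(aox, box):
--     n = max(len(aox), len(box))
--     out = []
--     for i in range(n - 1, -1, -1):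
--         a = int(aox[i]) if i < len(aox) else 0
--         b = int(box[i]) if i < len(box) else 0
--         d = abs(a - b)
--         if out or d != 0 or i == 0:
--             out.append(d)
--     out.reverse()
--     return out
-- ===== Notes on version B (the rewrite author's own statement) =====
-- stated objective: alternative
-- what changed: Single backward pass from the highest index that computes abs(aox[i]-box[i]) with zero padding and lazily skips trailing zeros as it goes (always keeping index 0), building the result in reverse and flipping once at the end - no negation list, no swap-and-pad addition helper, no separate abs pass, no reverse/pop-front/reverse trim.
import Mathlib
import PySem

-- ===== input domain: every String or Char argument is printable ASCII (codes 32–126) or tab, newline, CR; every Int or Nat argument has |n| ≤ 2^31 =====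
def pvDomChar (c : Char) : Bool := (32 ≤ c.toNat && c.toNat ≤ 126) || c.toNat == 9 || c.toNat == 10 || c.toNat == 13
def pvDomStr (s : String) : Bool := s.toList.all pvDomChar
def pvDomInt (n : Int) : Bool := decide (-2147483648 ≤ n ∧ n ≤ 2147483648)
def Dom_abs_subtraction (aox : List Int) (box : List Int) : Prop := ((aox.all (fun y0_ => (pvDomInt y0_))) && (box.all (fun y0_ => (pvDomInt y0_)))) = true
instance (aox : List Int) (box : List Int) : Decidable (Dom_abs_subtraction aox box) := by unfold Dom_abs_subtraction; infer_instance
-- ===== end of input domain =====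

-- B replaces A's staged passes (negate box, swap-and-pad addition helper, abs pass,
-- reverse/pop-front/reverse trim) with one backward pass from the highest index that
-- lazily skips trailing zeros while building the result in reverse; objective: alternative (one fused backward pass instead of four staged passes).
-- ===== PORT A =====
-- while-loop of popzero (only entered with length > 1): pop leading zeros, stop when one element remains
def popzeroGo : List Int → List Int
  | [] => []
  | x :: xs => if x = 0 then (if xs.length = 1 then xs else popzeroGo xs) else x :: xs
def popzero (poly : List Int) : List Int :=
  if 1 < poly.length then popzeroGo poly else poly
def popzero_rev (poly : List Int) : List Int :=
  (popzero poly.reverse).reverse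
def addition (aox : List Int) (box : List Int) : List Int :=
  let p := if aox.length < box.length then (box, aox) else (aox, box)
  (List.range p.1.length).map (fun i =>
    if i < p.2.length then p.1.getD i 0 + p.2.getD i 0 else p.1.getD i 0)
def abs_subtraction (aox : List Int) (box : List Int) : List Int :=
  let box_neg := (List.range box.length).map (fun i => box.getD i 0 * (-1))
  let poly := addition aox box_neg
  let poly2 := (List.range poly.length).map (fun j => |poly.getD j 0|)
  popzero_rev poly2
-- ===== PORT B =====
-- one iteration of B's backward loop (body of `for i in range(n-1,-1,-1)`)
def stepB (aox box : List Int) (i : Nat) (out : List Int) : List Int :=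
  let a := if i < aox.length then aox.getD i 0 else 0
  let b := if i < box.length then box.getD i 0 else 0
  let d := |a - b|
  if out ≠ [] ∨ d ≠ 0 ∨ i = 0 then out ++ [d] else out
-- the loop itself, running index i down to 0
def loopB (aox box : List Int) : Nat → List Int → List Int
  | 0, out => stepB aox box 0 out
  | (j+1), out => loopB aox box j (stepB aox box (j+1) out)
def abs_subtraction_alt (aox : List Int) (box : List Int) : List Int :=
  let n := max aox.length box.length
  if n = 0 then [] else (loopB aox box (n-1) []).reverse
-- ===== PRECONDITION & SPEC =====
def Spec_abs_subtraction (aox : List Int) (box : List Int) (out : List Int) : Prop := out = abs_subtraction_alt aox box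
instance (aox : List Int) (box : List Int) (out : List Int) : Decidable (Spec_abs_subtraction aox box out) := by unfold Spec_abs_subtraction; infer_instance
-- ===== CLAIM (what is proved, stated in full; the proofs are below) =====
def Claim_equal_abs_subtraction : Prop := ∀ (aox : List Int) (box : List Int), Dom_abs_subtraction aox box → Spec_abs_subtraction aox box (abs_subtraction aox box)
-- ===== LEMMAS AND PROOFS =====
-- the padded absolute difference at index i (getD already pads with 0 out of range)
def dF (aox box : List Int) (i : Nat) : Int := |aox.getD i 0 - box.getD i 0|
lemma getD_pad (L : List Int) (i : Nat) :
    (if i < L.length then L.getD i 0 else 0) = L.getD i 0 := by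
  by_cases h : i < L.length
  · rw [if_pos h]
  · rw [if_neg h, List.getD_eq_default _ _ (Nat.not_lt.mp h)]
lemma stepB_eq (aox box : List Int) (i : Nat) (out : List Int) :
    stepB aox box i out =
      if out ≠ [] ∨ dF aox box i ≠ 0 ∨ i = 0 then out ++ [dF aox box i] else out := by
  unfold stepB dF
  rw [getD_pad, getD_pad]
-- appending phase: once out is nonempty every remaining d is appended
lemma loopB_nonempty (aox box : List Int) (j : Nat) :
    ∀ out : List Int, out ≠ [] →
      loopB aox box j out = out ++ ((List.range (j+1)).map (dF aox box)).reverse := by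
  induction j with
  | zero =>
    intro out h
    simp [loopB, stepB_eq, h]
  | succ j ih =>
    intro out h
    rw [loopB, stepB_eq, if_pos (Or.inl h)]
    rw [ih _ (by simp)]
    rw [List.range_succ (n := j+1)]
    simp
-- skipping phase: starting from [] the loop computes popzero of the reversed d-list
lemma loopB_nil (aox box : List Int) (j : Nat) :
    loopB aox box j [] = popzero (((List.range (j+1)).map (dF aox box)).reverse) := by
  induction j with
  | zero =>
    simp [loopB, stepB_eq, popzero]
  | succ j ih =>
    have hrev : ((List.range (j+2)).map (dF aox box)).reverse =
        dF aox box (j+1) :: ((List.range (j+1)).map (dF aox box)).reverse := by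
      rw [List.range_succ (n := j+1)]; simp
    by_cases hd : dF aox box (j+1) = 0
    · rw [loopB, stepB_eq, if_neg (by simp [hd])]
      rw [ih, hrev, hd]
      have hlen : (((List.range (j+1)).map (dF aox box)).reverse).length = j+1 := by simp
      conv_rhs => rw [popzero]
      rw [if_pos (by simp only [List.length_cons, hlen]; omega)]
      rw [popzeroGo, if_pos rfl]
      by_cases h1 : j = 0
      · subst h1
        rw [if_pos (by rw [hlen])]
        rw [popzero, if_neg (by rw [hlen]; omega)]
      · rw [if_neg (by rw [hlen]; omega)]
        rw [popzero, if_pos (by rw [hlen]; omega)]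
    · rw [loopB, stepB_eq, if_pos (by simp [hd])]
      rw [loopB_nonempty _ _ _ _ (by simp)]
      rw [hrev]
      unfold popzero
      rw [if_pos (by simp)]
      rw [popzeroGo, if_neg hd]
      simp
-- A's poly2 is exactly the map of dF over range n
lemma poly2_eq (aox box : List Int) :
    (List.range (addition aox ((List.range box.length).map (fun i => box.getD i 0 * (-1)))).length).map
      (fun j => |(addition aox ((List.range box.length).map (fun i => box.getD i 0 * (-1)))).getD j 0|) =
    (List.range (max aox.length box.length)).map (dF aox box) := by
  have hneg : (List.range box.length).map (fun i => box.getD i 0 * (-1)) = box.map (fun x => -x) := by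
    apply List.ext_getElem
    · simp
    · intro i h1 h2
      have hi : i < box.length := by simpa using h1
      simp only [List.getElem_map, List.getElem_range]
      rw [List.getD_eq_getElem _ _ hi]
      ring
  rw [hneg]
  have hkey : ∀ (L S : List Int), ∀ i : Nat,
      (if i < S.length then L.getD i 0 + S.getD i 0 else L.getD i 0) = L.getD i 0 + S.getD i 0 := by
    intro L S i
    by_cases h : i < S.length
    · rw [if_pos h]
    · rw [if_neg h, List.getD_eq_default _ _ (Nat.not_lt.mp h), Int.add_zero]
  unfold addition
  by_cases hlt : aox.length < (box.map (fun x => -x)).length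
  · rw [if_pos hlt]
    simp only []
    apply List.ext_getElem
    · simp at hlt ⊢; omega
    · intro i h1 h2
      have hi : i < (box.map (fun x => -x)).length := by simpa using h1
      simp only [List.getElem_map, List.getElem_range]
      rw [PySem.List.getD_map_range _ _ _ _ hi]
      rw [hkey]
      unfold dF
      congr 1
      have hbb : (box.map (fun x => -x)).getD i 0 = -(box.getD i 0) := by
        by_cases hib : i < box.length
        · rw [List.getD_eq_getElem _ _ hib, List.getD_eq_getElem (box.map _) _ (by simpa using hib)]
          simp
        · rw [List.getD_eq_default _ _ (by simpa using hib),
              List.getD_eq_default _ _ (Nat.not_lt.mp hib)]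
          simp
      rw [hbb]; ring
  · rw [if_neg hlt]
    simp only []
    apply List.ext_getElem
    · simp at hlt ⊢; omega
    · intro i h1 h2
      have hi : i < aox.length := by simpa using h1
      simp only [List.getElem_map, List.getElem_range]
      rw [PySem.List.getD_map_range _ _ _ _ hi]
      rw [hkey]
      unfold dF
      congr 1
      have hbb : (box.map (fun x => -x)).getD i 0 = -(box.getD i 0) := by
        by_cases hib : i < box.length
        · rw [List.getD_eq_getElem _ _ hib, List.getD_eq_getElem (box.map _) _ (by simpa using hib)]
          simp
        · rw [List.getD_eq_default _ _ (by simpa using hib),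
              List.getD_eq_default _ _ (Nat.not_lt.mp hib)]
          simp
      rw [hbb]; ring
-- ===== VERDICT (by name: the statement is the Claim_ definition above) =====
theorem abs_subtraction_spec : Claim_equal_abs_subtraction := by
  intro aox box _
  simp only [Spec_abs_subtraction, abs_subtraction, abs_subtraction_alt]
  rw [poly2_eq]
  by_cases hn : max aox.length box.length = 0
  · rw [if_pos hn, hn]
    simp [popzero_rev, popzero]
  · rw [if_neg hn]
    rw [loopB_nil]
    have h1 : max aox.length box.length - 1 + 1 = max aox.length box.length := by omega
    rw [h1]
    unfold popzero_rev
    rfl
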